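-- pv_equiv track=rewrite | github.com/JaromirKligl/YTbot | games/tictactoe/minimax.py | available_positions
-- ===== SOURCE A (Python) =====
-- def available_positions (board, player : int):
--
--     possible_boards = []
--     for row in range(len(board)):
--         for col in range(len(board[row])):
--             if board[row][col] == 0:
--                 new_board = [row.copy() for row in board]
--                 new_board[row][col] = player
--                 possible_boards.append(new_board)
--
--     return possible_boards
-- ===== SOURCE B (Python) =====
-- def fill_row(row, player):
--     """All versions of `row` with one 0 (leftmost first) replaced by player."""
--     if not row:
--         return []
--     x, rest = row[0], row[1:]
--     here = [[player] + rest] if x == 0 else []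
--     return here + [[x] + r for r in fill_row(rest, player)]
--
--
-- def available_positions(board, player: int):
--     if not board:
--         return []
--     first, rest = board[0], board[1:]
--     return ([[r] + rest for r in fill_row(first, player)]
--             + [[first] + b for b in available_positions(rest, player)])
-- ===== Notes on version B (the rewrite author's own statement) =====
-- stated objective: alternative
-- what changed: Replaces A's index-driven nested loops with copy-the-whole-grid-then-mutate by a structural recursion: fill_row recursively produces the successors within one row, and available_positions recurses on the list of rows, prepending the unchanged head row to the recursive results; no indices, ranges or in-place assignment are used.
import Mathlib
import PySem

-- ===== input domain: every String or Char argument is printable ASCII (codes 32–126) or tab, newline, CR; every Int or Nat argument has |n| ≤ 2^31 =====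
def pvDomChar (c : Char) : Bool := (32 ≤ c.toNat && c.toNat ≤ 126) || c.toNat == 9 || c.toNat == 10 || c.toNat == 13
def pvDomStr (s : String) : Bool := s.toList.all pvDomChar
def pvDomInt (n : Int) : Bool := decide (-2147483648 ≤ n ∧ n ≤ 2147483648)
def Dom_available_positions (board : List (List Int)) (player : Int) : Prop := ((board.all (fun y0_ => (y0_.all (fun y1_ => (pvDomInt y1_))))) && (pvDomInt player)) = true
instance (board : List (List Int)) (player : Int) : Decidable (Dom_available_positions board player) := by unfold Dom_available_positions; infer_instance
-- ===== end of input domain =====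

-- B replaces A's index loops + copy-grid-then-mutate by a structural recursion (fill_row over a row, recursion over the rows); return value identical, objective: alternative decomposition.


-- ===== PORT A =====
-- for row in range(len(board)): for col in range(len(board[row])): if board[row][col]==0:
--   new_board = [r.copy() for r in board]; new_board[row][col] = player; append
def available_positions (board : List (List Int)) (player : Int) : List (List (List Int)) :=
  (PySem.List.pyRange 0 board.length 1).foldl (fun acc row =>
    (PySem.List.pyRange 0 (PySem.List.pyGetD board row []).length 1).foldl (fun acc2 col =>
      if PySem.List.pyGetD (PySem.List.pyGetD board row []) col 0 == 0 then
        acc2 ++ [PySem.List.pySetD (board.map (fun r => r)) row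
                   (PySem.List.pySetD (PySem.List.pyGetD (board.map (fun r => r)) row []) col player)]
      else acc2) acc) []

-- ===== PORT B =====
-- def fill_row(row, player): if not row: return []; x, rest = row[0], row[1:]
--   here = [[player]+rest] if x==0 else []; return here + [[x]+r for r in fill_row(rest, player)]
def fillRow (row : List Int) (player : Int) : List (List Int) :=
  match row with
  | [] => []
  | x :: rest =>
    (if x == 0 then [player :: rest] else []) ++ (fillRow rest player).map (fun r => x :: r)

-- if not board: return []; first, rest = board[0], board[1:]
-- return [[r]+rest for r in fill_row(first,player)] + [[first]+b for b in available_positions(rest,player)]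
def available_positions_alt (board : List (List Int)) (player : Int) : List (List (List Int)) :=
  match board with
  | [] => []
  | first :: rest =>
    (fillRow first player).map (fun r => r :: rest)
      ++ (available_positions_alt rest player).map (fun b => first :: b)

-- ===== PRECONDITION & SPEC =====
def Spec_available_positions (board : List (List Int)) (player : Int) (out : List (List (List Int))) : Prop := out = available_positions_alt board player
instance (board : List (List Int)) (player : Int) (out : List (List (List Int))) : Decidable (Spec_available_positions board player out) := by unfold Spec_available_positions; infer_instance

-- ===== CLAIM (what is proved, stated in full; the proofs are below) =====
def Claim_equal_available_positions : Prop := ∀ (board : List (List Int)) (player : Int), Dom_available_positions board player → Spec_available_positions board player (available_positions board player)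

-- ===== LEMMAS AND PROOFS =====

-- shared index-based characterisation both ports are reduced to
def idxForm (board : List (List Int)) (player : Int) : List (List (List Int)) :=
  (List.range board.length).flatMap (fun k =>
    ((List.range ((board.getD k []).length)).filter
        (fun c => (board.getD k []).getD c 0 == 0)).map
      (fun c => board.set k ((board.getD k []).set c player)))

theorem available_positions_eq_idxForm (board : List (List Int)) (player : Int) :
    available_positions board player = idxForm board player := by
  unfold available_positions idxForm
  simp only [PySem.List.foldl_append_if, PySem.List.foldl_append_eq_flatMap, List.nil_append]
  rw [PySem.List.pyRange_zero_nat board.length, List.flatMap_map]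
  apply List.flatMap_congr
  intro k hk
  have hk' : k < board.length := List.mem_range.mp hk
  simp only [PySem.List.pyGetD_natCast, List.map_id']
  rw [PySem.List.pyRange_zero_nat, List.filter_map, List.map_map]
  simp only [Function.comp_def, PySem.List.pyGetD_natCast, PySem.List.pySetD_natCast]

theorem fillRow_eq (row : List Int) (player : Int) :
    fillRow row player =
      ((List.range row.length).filter (fun c => row.getD c 0 == 0)).map
        (fun c => row.set c player) := by
  induction row with
  | nil => simp [fillRow]
  | cons x xs ih =>
    simp only [fillRow, ih, List.length_cons, List.range_succ_eq_map, List.filter_cons,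
      List.filter_map, List.map_map]
    by_cases hx : x = 0 <;>
      simp [hx, Function.comp_def, List.map_map]

theorem alt_eq_idxForm (board : List (List Int)) (player : Int) :
    available_positions_alt board player = idxForm board player := by
  induction board with
  | nil => simp [available_positions_alt, idxForm]
  | cons first rest ih =>
    simp only [available_positions_alt, ih, idxForm, List.length_cons,
      List.range_succ_eq_map, List.flatMap_cons, List.flatMap_map, fillRow_eq]
    congr 1
    · simp
    · rw [List.map_flatMap]
      apply List.flatMap_congr
      intro k _
      simp [List.map_map, Function.comp_def]

-- ===== VERDICT (by name: the statement is the Claim_ definition above) =====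
theorem available_positions_spec : Claim_equal_available_positions := by
  intro board player _
  unfold Spec_available_positions
  rw [available_positions_eq_idxForm, alt_eq_idxForm]
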